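-- pv_equiv track=rewrite | github.com/Ashok-19/ARC-GEN-validator | common.py | some_abutted
-- ===== SOURCE A (Python) =====
-- def some_abutted(rows, cols, wides, talls):
--   for j in range(len(rows)):
--     for i in range(j):
--       if rows[i] + talls[i] == rows[j] or rows[j] + talls[j] == rows[i]:
--         if cols[i] + wides[i] <= cols[j] or cols[j] + wides[j] <= cols[i]:
--           continue
--         return True
--       if cols[i] + wides[i] == cols[j] or cols[j] + wides[j] == cols[i]:
--         if rows[i] + talls[i] <= rows[j] or rows[j] + talls[j] <= rows[i]:
--           continue
--         return True
--   return False
-- ===== SOURCE B (Python) =====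
-- def some_abutted(rows, cols, wides, talls):
--     # Group previously-seen rectangles in dicts keyed by each edge coordinate,
--     # so each rectangle is only compared against rectangles sharing an edge line.
--     tops = {}     # row (top edge y)      -> list of (col, wide)
--     bottoms = {}  # row+tall (bottom y)   -> list of (col, wide)
--     lefts = {}    # col (left edge x)     -> list of (row, tall)
--     rights = {}   # col+wide (right x)    -> list of (row, tall)
--     for r, c, w, t in zip(rows, cols, wides, talls):
--         for oc, ow in bottoms.get(r, ()):          # other's bottom == my top
--             if oc < c + w and c < oc + ow:
--                 return True
--         for oc, ow in tops.get(r + t, ()):         # my bottom == other's top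
--             if oc < c + w and c < oc + ow:
--                 return True
--         for orr, ot in rights.get(c, ()):          # other's right == my left
--             if orr < r + t and r < orr + ot:
--                 return True
--         for orr, ot in lefts.get(c + w, ()):       # my right == other's left
--             if orr < r + t and r < orr + ot:
--                 return True
--         tops.setdefault(r, []).append((c, w))
--         bottoms.setdefault(r + t, []).append((c, w))
--         lefts.setdefault(c, []).append((r, t))
--         rights.setdefault(c + w, []).append((r, t))
--     return False
-- ===== Notes on version B (the rewrite author's own statement) =====
-- stated objective: faster
-- what changed: Replaces the all-pairs double loop with a single pass that indexes each seen rectangle's four edge lines in hash maps, so every rectangle is compared only against rectangles sharing an abutting edge coordinate.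
-- outside the precondition, e.g. on some_abutted([0, 5], [0, 0], [2, 2], [5]): A returns True, B returns False
import Mathlib
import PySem

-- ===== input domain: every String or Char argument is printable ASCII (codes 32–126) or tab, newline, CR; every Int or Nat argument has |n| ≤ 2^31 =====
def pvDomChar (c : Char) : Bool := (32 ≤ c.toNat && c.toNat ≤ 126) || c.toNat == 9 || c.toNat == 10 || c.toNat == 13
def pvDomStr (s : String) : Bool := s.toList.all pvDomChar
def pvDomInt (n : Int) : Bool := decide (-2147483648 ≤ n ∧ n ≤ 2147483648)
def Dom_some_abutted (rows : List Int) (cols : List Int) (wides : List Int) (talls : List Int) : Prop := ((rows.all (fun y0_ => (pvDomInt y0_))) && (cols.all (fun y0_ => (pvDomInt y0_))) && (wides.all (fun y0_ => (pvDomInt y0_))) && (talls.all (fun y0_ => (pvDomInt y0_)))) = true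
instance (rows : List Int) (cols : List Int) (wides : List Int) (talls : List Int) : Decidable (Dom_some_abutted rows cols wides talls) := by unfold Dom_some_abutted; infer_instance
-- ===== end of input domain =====

-- B replaces A's all-pairs O(n^2) double loop by a single pass that indexes each seen
-- rectangle's four edge lines in dictionaries, comparing each rectangle only against
-- rectangles that share an abutting edge coordinate.

-- ===== PORT A =====
-- Literal port of A's nested index loops with early return (List.any = loop returning
-- True on first hit). pyGetD is exact here: under Pre_ every index i < j < len(rows)
-- is in range for all four lists.
def some_abutted (rows : List Int) (cols : List Int) (wides : List Int) (talls : List Int) : Bool :=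
  (PySem.List.pyRange 0 (rows.length : Int) 1).any (fun j =>
    (PySem.List.pyRange 0 j 1).any (fun i =>
      if (PySem.List.pyGetD rows i 0 + PySem.List.pyGetD talls i 0 == PySem.List.pyGetD rows j 0
          || PySem.List.pyGetD rows j 0 + PySem.List.pyGetD talls j 0 == PySem.List.pyGetD rows i 0) then
        !(decide (PySem.List.pyGetD cols i 0 + PySem.List.pyGetD wides i 0 ≤ PySem.List.pyGetD cols j 0)
          || decide (PySem.List.pyGetD cols j 0 + PySem.List.pyGetD wides j 0 ≤ PySem.List.pyGetD cols i 0))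
      else if (PySem.List.pyGetD cols i 0 + PySem.List.pyGetD wides i 0 == PySem.List.pyGetD cols j 0
          || PySem.List.pyGetD cols j 0 + PySem.List.pyGetD wides j 0 == PySem.List.pyGetD cols i 0) then
        !(decide (PySem.List.pyGetD rows i 0 + PySem.List.pyGetD talls i 0 ≤ PySem.List.pyGetD rows j 0)
          || decide (PySem.List.pyGetD rows j 0 + PySem.List.pyGetD talls j 0 ≤ PySem.List.pyGetD rows i 0))
      else false))

-- ===== PORT B =====
-- B's single pass: state = four dicts mapping an edge coordinate to the (interval) data
-- of all previously seen rectangles having that edge line; each dict `.get` loop is a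
-- List.any, each `setdefault(...).append(...)` is an insert of (old list ++ [new]).
def altLoop (l : List (Int × Int × Int × Int))
    (tops bottoms lefts rights : PySem.Dict Int (List (Int × Int))) : Bool :=
  match l with
  | [] => false
  | (r, c, w, t) :: rest =>
    if (bottoms.getD r []).any (fun o => decide (o.1 < c + w) && decide (c < o.1 + o.2)) then true
    else if (tops.getD (r + t) []).any (fun o => decide (o.1 < c + w) && decide (c < o.1 + o.2)) then true
    else if (rights.getD c []).any (fun o => decide (o.1 < r + t) && decide (r < o.1 + o.2)) then true
    else if (lefts.getD (c + w) []).any (fun o => decide (o.1 < r + t) && decide (r < o.1 + o.2)) then true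
    else altLoop rest
      (tops.insert r (tops.getD r [] ++ [(c, w)]))
      (bottoms.insert (r + t) (bottoms.getD (r + t) [] ++ [(c, w)]))
      (lefts.insert c (lefts.getD c [] ++ [(r, t)]))
      (rights.insert (c + w) (rights.getD (c + w) [] ++ [(r, t)]))

def some_abutted_alt (rows : List Int) (cols : List Int) (wides : List Int) (talls : List Int) : Bool :=
  altLoop (rows.zip (cols.zip (wides.zip talls)))
    PySem.Dict.empty PySem.Dict.empty PySem.Dict.empty PySem.Dict.empty

-- ===== PRECONDITION & SPEC =====
-- Pre_ admits every input with at most one rectangle, and every input where no list is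
-- shorter than rows. It excludes inputs where cols/wides/talls are shorter than rows
-- (with at least two rows): there A in general raises IndexError, and any early True
-- returned before the first out-of-range access is an accident of A's scan order.
def Pre_some_abutted (rows : List Int) (cols : List Int) (wides : List Int) (talls : List Int) : Prop :=
  rows.length ≤ 1 ∨
  (rows.length ≤ cols.length ∧ rows.length ≤ wides.length ∧ rows.length ≤ talls.length)
instance (rows : List Int) (cols : List Int) (wides : List Int) (talls : List Int) : Decidable (Pre_some_abutted rows cols wides talls) := by unfold Pre_some_abutted; infer_instance

def pvWitness_some_abutted : List Int × List Int × List Int × List Int :=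
  ([0, 0], [0, 2], [2, 2], [1, 1])

def Spec_some_abutted (rows : List Int) (cols : List Int) (wides : List Int) (talls : List Int) (out : Bool) : Prop := out = some_abutted_alt rows cols wides talls
instance (rows : List Int) (cols : List Int) (wides : List Int) (talls : List Int) (out : Bool) : Decidable (Spec_some_abutted rows cols wides talls out) := by unfold Spec_some_abutted; infer_instance

-- ===== CLAIM (what is proved, stated in full; the proofs are below) =====
def Claim_equal_some_abutted : Prop := ∀ (rows : List Int) (cols : List Int) (wides : List Int) (talls : List Int), Dom_some_abutted rows cols wides talls → Pre_some_abutted rows cols wides talls → Spec_some_abutted rows cols wides talls (some_abutted rows cols wides talls)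

-- ===== LEMMAS AND PROOFS =====

-- the quadruple of list entries at index k, as port A reads them
def gQuad (rows cols wides talls : List Int) (k : Int) : Int × Int × Int × Int :=
  (PySem.List.pyGetD rows k 0, PySem.List.pyGetD cols k 0,
   PySem.List.pyGetD wides k 0, PySem.List.pyGetD talls k 0)

-- A's inner-loop body as a predicate on two quadruples (i-rect a, j-rect b)
def PA (a b : Int × Int × Int × Int) : Bool :=
  if (a.1 + a.2.2.2 == b.1 || b.1 + b.2.2.2 == a.1) then
    !(decide (a.2.1 + a.2.2.1 ≤ b.2.1) || decide (b.2.1 + b.2.2.1 ≤ a.2.1))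
  else if (a.2.1 + a.2.2.1 == b.2.1 || b.2.1 + b.2.2.1 == a.2.1) then
    !(decide (a.1 + a.2.2.2 ≤ b.1) || decide (b.1 + b.2.2.2 ≤ a.1))
  else false

-- the symmetric "abutting" predicate both sides compute
def Pq (a b : Int × Int × Int × Int) : Bool :=
  ((a.1 + a.2.2.2 == b.1 || b.1 + b.2.2.2 == a.1)
     && (decide (a.2.1 < b.2.1 + b.2.2.1) && decide (b.2.1 < a.2.1 + a.2.2.1)))
  || ((a.2.1 + a.2.2.1 == b.2.1 || b.2.1 + b.2.2.1 == a.2.1)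
     && (decide (a.1 < b.1 + b.2.2.2) && decide (b.1 < a.1 + a.2.2.2)))

-- A's asymmetric check equals the symmetric one: an edge-matched coordinate forbids
-- overlap in that same coordinate, so the skipped second branch can never fire
theorem PA_eq_Pq (a b : Int × Int × Int × Int) : PA a b = Pq a b := by
  obtain ⟨r1, c1, w1, t1⟩ := a
  obtain ⟨r2, c2, w2, t2⟩ := b
  simp only [PA, Pq]
  rw [Bool.eq_iff_iff]
  split_ifs with h1 h2
  · simp only [Bool.or_eq_true, beq_iff_eq] at h1
    simp only [Bool.not_eq_true', Bool.or_eq_false_iff, decide_eq_false_iff_not, not_le,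
      Bool.or_eq_true, Bool.and_eq_true, beq_iff_eq, decide_eq_true_eq]
    omega
  · simp only [Bool.or_eq_true, beq_iff_eq] at h1 h2
    simp only [Bool.not_eq_true', Bool.or_eq_false_iff, decide_eq_false_iff_not, not_le,
      Bool.or_eq_true, Bool.and_eq_true, beq_iff_eq, decide_eq_true_eq]
    omega
  · simp only [Bool.or_eq_true, beq_iff_eq] at h1 h2
    simp only [false_iff, Bool.or_eq_true, Bool.and_eq_true, beq_iff_eq,
      decide_eq_true_eq, not_or]
    omega

theorem any_or_distrib {α : Type} (l : List α) (f g : α → Bool) :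
    l.any (fun x => f x || g x) = (l.any f || l.any g) := by
  induction l with
  | nil => rfl
  | cons a l ih =>
    simp only [List.any_cons, ih]
    cases f a <;> cases g a <;> cases l.any f <;> cases l.any g <;> simp

theorem any_filter_map {α β : Type} (l : List α) (p : α → Bool) (f : α → β) (q : β → Bool) :
    ((l.filter p).map f).any q = l.any (fun x => p x && q (f x)) := by
  induction l with
  | nil => rfl
  | cons a l ih =>
    simp only [List.filter_cons]
    split_ifs with hp <;> simp [List.any_cons, ih, hp]

-- forward all-pairs check: head against every later element, then recurse
def pairsAny {α : Type} (f : α → α → Bool) : List α → Bool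
  | [] => false
  | a :: rest => rest.any (f a) || pairsAny f rest

theorem pairsAny_append_singleton {α : Type} (f : α → α → Bool) (l : List α) (b : α) :
    pairsAny f (l ++ [b]) = (pairsAny f l || l.any (fun a => f a b)) := by
  induction l with
  | nil => simp [pairsAny]
  | cons a l ih =>
    simp only [List.cons_append, pairsAny, ih, List.any_append, List.any_cons,
      List.any_nil, Bool.or_false]
    cases f a b <;> cases l.any (f a) <;> cases pairsAny f l <;> simp

theorem pairsAny_congr {α : Type} (f f' : α → α → Bool) (hf : ∀ a b, f a b = f' a b)
    (l : List α) : pairsAny f l = pairsAny f' l := by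
  have h : f = f' := funext (fun a => funext (fun b => hf a b))
  rw [h]

theorem any_range_g {α : Type} (g : Int → α) (h : α → Bool) (L : List α)
    (hg : ∀ k : Nat, (hk : k < L.length) → g k = L[k]) :
    ∀ m : Nat, m ≤ L.length →
      (PySem.List.pyRange 0 (m : Int) 1).any (fun i => h (g i)) = (L.take m).any h := by
  intro m
  induction m with
  | zero => intro _; simp [PySem.List.pyRange_one_eq_nil]
  | succ m ih =>
    intro hm
    have hlt : m < L.length := by omega
    have h1 : ((m + 1 : Nat) : Int) = (m : Int) + 1 := by push_cast; ring
    have h2 : L.take (m + 1) = L.take m ++ [L[m]] := by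
      rw [List.take_add_one]
      simp [List.getElem?_eq_getElem hlt]
    rw [h1, PySem.List.pyRange_one_succ_right (by positivity), List.any_append,
      ih (by omega), h2, List.any_append]
    simp [hg m hlt]

theorem A_eq_pairsAny {α : Type} (g : Int → α) (f : α → α → Bool) (L : List α)
    (hg : ∀ k : Nat, (hk : k < L.length) → g k = L[k]) :
    ∀ m : Nat, m ≤ L.length →
      (PySem.List.pyRange 0 (m : Int) 1).any
        (fun j => (PySem.List.pyRange 0 j 1).any (fun i => f (g i) (g j)))
      = pairsAny f (L.take m) := by
  intro m
  induction m with
  | zero => intro _; simp [PySem.List.pyRange_one_eq_nil, pairsAny]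
  | succ m ih =>
    intro hm
    have hlt : m < L.length := by omega
    have h1 : ((m + 1 : Nat) : Int) = (m : Int) + 1 := by push_cast; ring
    have h2 : L.take (m + 1) = L.take m ++ [L[m]] := by
      rw [List.take_add_one]
      simp [List.getElem?_eq_getElem hlt]
    have hinner : (PySem.List.pyRange 0 ((m : Nat) : Int) 1).any (fun i => f (g i) (g m))
        = (L.take m).any (fun a => f a L[m]) := by
      rw [any_range_g g (fun a => f a (g m)) L hg m (by omega), hg m hlt]
    rw [h1, PySem.List.pyRange_one_succ_right (by positivity), List.any_append,
      ih (by omega), h2, pairsAny_append_singleton]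
    simp only [List.any_cons, List.any_nil, Bool.or_false, hinner]

-- B's pass, abstracted: remaining elements against the already-seen prefix
def scanPairs {α : Type} (f : α → α → Bool) : List α → List α → Bool
  | [], _ => false
  | b :: rest, seen => seen.any (fun a => f a b) || scanPairs f rest (seen ++ [b])

theorem scanPairs_eq {α : Type} (f : α → α → Bool) :
    ∀ (l seen : List α),
      scanPairs f l seen = (seen.any (fun a => l.any (fun b => f a b)) || pairsAny f l) := by
  intro l
  induction l with
  | nil => intro seen; simp [scanPairs, pairsAny]
  | cons b rest ih =>
    intro seen
    simp only [scanPairs, ih, pairsAny, List.any_append, List.any_cons, List.any_nil,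
      Bool.or_false]
    rw [any_or_distrib]
    simp only [Bool.or_assoc, Bool.or_left_comm, Bool.or_comm]

theorem scanPairs_nil_eq {α : Type} (f : α → α → Bool) (l : List α) :
    scanPairs f l [] = pairsAny f l := by
  rw [scanPairs_eq]; simp

-- the dict invariant: each dict's bucket at key y is the list of seen rectangles whose
-- corresponding edge lies on line y, projected to the interval data stored there
def DInv (seen : List (Int × Int × Int × Int))
    (d : PySem.Dict Int (List (Int × Int)))
    (key : Int × Int × Int × Int → Int) (prj : Int × Int × Int × Int → Int × Int) : Prop :=
  ∀ y, d.getD y [] = ((seen.filter (fun a => key a == y)).map prj)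

theorem DInv_empty (key : Int × Int × Int × Int → Int)
    (prj : Int × Int × Int × Int → Int × Int) :
    DInv [] PySem.Dict.empty key prj := by
  intro y
  simp [PySem.Dict.getD, PySem.Dict.get?, PySem.Dict.empty]

theorem DInv_step (seen : List (Int × Int × Int × Int))
    (d : PySem.Dict Int (List (Int × Int)))
    (key : Int × Int × Int × Int → Int) (prj : Int × Int × Int × Int → Int × Int)
    (b : Int × Int × Int × Int) (h : DInv seen d key prj) :
    DInv (seen ++ [b]) (d.insert (key b) (d.getD (key b) [] ++ [prj b])) key prj := by
  intro y
  rw [PySem.Dict.getD_insert, List.filter_append, List.map_append]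
  by_cases hy : y = key b
  · subst hy
    rw [h]
    simp
  · have hb : (key b == y) = false := by
      simp only [beq_eq_false_iff_ne, ne_eq]
      exact fun h' => hy h'.symm
    rw [if_neg hy, h y]
    simp [hb]

theorem altLoop_eq (l : List (Int × Int × Int × Int)) :
    ∀ (seen : List (Int × Int × Int × Int))
      (tops bottoms lefts rights : PySem.Dict Int (List (Int × Int))),
      DInv seen tops (fun a => a.1) (fun a => (a.2.1, a.2.2.1)) →
      DInv seen bottoms (fun a => a.1 + a.2.2.2) (fun a => (a.2.1, a.2.2.1)) →
      DInv seen lefts (fun a => a.2.1) (fun a => (a.1, a.2.2.2)) →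
      DInv seen rights (fun a => a.2.1 + a.2.2.1) (fun a => (a.1, a.2.2.2)) →
      altLoop l tops bottoms lefts rights = scanPairs Pq l seen := by
  induction l with
  | nil => intro seen t b lf rg _ _ _ _; rfl
  | cons hd rest ih =>
    intro seen tops bottoms lefts rights hT hB hL hR
    obtain ⟨r, c, w, t⟩ := hd
    have e1 : (bottoms.getD r []).any (fun o => decide (o.1 < c + w) && decide (c < o.1 + o.2))
        = seen.any (fun a => (a.1 + a.2.2.2 == r) && (decide (a.2.1 < c + w) && decide (c < a.2.1 + a.2.2.1))) := by
      rw [hB r, any_filter_map]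
    have e2 : (tops.getD (r + t) []).any (fun o => decide (o.1 < c + w) && decide (c < o.1 + o.2))
        = seen.any (fun a => (a.1 == r + t) && (decide (a.2.1 < c + w) && decide (c < a.2.1 + a.2.2.1))) := by
      rw [hT (r + t), any_filter_map]
    have e3 : (rights.getD c []).any (fun o => decide (o.1 < r + t) && decide (r < o.1 + o.2))
        = seen.any (fun a => (a.2.1 + a.2.2.1 == c) && (decide (a.1 < r + t) && decide (r < a.1 + a.2.2.2))) := by
      rw [hR c, any_filter_map]
    have e4 : (lefts.getD (c + w) []).any (fun o => decide (o.1 < r + t) && decide (r < o.1 + o.2))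
        = seen.any (fun a => (a.2.1 == c + w) && (decide (a.1 < r + t) && decide (r < a.1 + a.2.2.2))) := by
      rw [hL (c + w), any_filter_map]
    have hcheck : ∀ a : Int × Int × Int × Int,
        (((a.1 + a.2.2.2 == r) && (decide (a.2.1 < c + w) && decide (c < a.2.1 + a.2.2.1)))
         || (((a.1 == r + t) && (decide (a.2.1 < c + w) && decide (c < a.2.1 + a.2.2.1)))
         || (((a.2.1 + a.2.2.1 == c) && (decide (a.1 < r + t) && decide (r < a.1 + a.2.2.2)))
         || ((a.2.1 == c + w) && (decide (a.1 < r + t) && decide (r < a.1 + a.2.2.2))))))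
        = Pq a (r, c, w, t) := by
      intro a
      simp only [Pq]
      rw [Bool.eq_iff_iff]
      simp only [Bool.or_eq_true, Bool.and_eq_true, beq_iff_eq, decide_eq_true_eq]
      constructor <;> intro h <;> tauto
    have hsum :
        (seen.any (fun a => (a.1 + a.2.2.2 == r) && (decide (a.2.1 < c + w) && decide (c < a.2.1 + a.2.2.1)))
         || (seen.any (fun a => (a.1 == r + t) && (decide (a.2.1 < c + w) && decide (c < a.2.1 + a.2.2.1)))
         || (seen.any (fun a => (a.2.1 + a.2.2.1 == c) && (decide (a.1 < r + t) && decide (r < a.1 + a.2.2.2)))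
         || seen.any (fun a => (a.2.1 == c + w) && (decide (a.1 < r + t) && decide (r < a.1 + a.2.2.2))))))
        = seen.any (fun a => Pq a (r, c, w, t)) := by
      rw [← any_or_distrib, ← any_or_distrib, ← any_or_distrib]
      congr 1
      funext a
      rw [hcheck a]
    simp only [altLoop, scanPairs, e1, e2, e3, e4]
    rw [ih (seen ++ [(r, c, w, t)]) _ _ _ _
      (DInv_step _ _ _ _ _ hT) (DInv_step _ _ _ _ _ hB)
      (DInv_step _ _ _ _ _ hL) (DInv_step _ _ _ _ _ hR)]
    split_ifs with h1 h2 h3 h4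
    · rw [← hsum, h1]; simp
    · rw [Bool.not_eq_true] at h1
      rw [← hsum, h1, h2]; simp
    · rw [Bool.not_eq_true] at h1 h2
      rw [← hsum, h1, h2, h3]; simp
    · rw [Bool.not_eq_true] at h1 h2 h3
      rw [← hsum, h1, h2, h3, h4]; simp
    · rw [Bool.not_eq_true] at h1 h2 h3 h4
      rw [← hsum, h1, h2, h3, h4]; simp

-- ===== VERDICT (by name: the statement is the Claim_ definition above) =====
theorem some_abutted_spec : Claim_equal_some_abutted := by
  intro rows cols wides talls _ hpre
  unfold Spec_some_abutted
  rcases hpre with hsmall | ⟨hc, hw, ht⟩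
  · -- at most one rectangle: both sides are vacuously false
    rcases rows with _ | ⟨r, rtail⟩
    · simp [some_abutted, some_abutted_alt, altLoop, PySem.List.pyRange_one_eq_nil]
    · have hnil : rtail = [] := by
        simp only [List.length_cons] at hsmall
        exact List.eq_nil_of_length_eq_zero (by omega)
      subst hnil
      have hA1 : some_abutted [r] cols wides talls = false := by
        simp [some_abutted, PySem.List.pyRange_one]
      rcases hM : cols.zip (wides.zip talls) with _ | ⟨x, Mtail⟩
      · simp [hA1, some_abutted_alt, hM, altLoop]
      · obtain ⟨cc, ww, tt⟩ := x
        simp [hA1, some_abutted_alt, hM, altLoop,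
          PySem.Dict.getD, PySem.Dict.get?, PySem.Dict.empty]
  have hlen : (rows.zip (cols.zip (wides.zip talls))).length = rows.length := by
    simp [List.length_zip]
    omega
  have hg : ∀ k : Nat, (hk : k < (rows.zip (cols.zip (wides.zip talls))).length) →
      gQuad rows cols wides talls k = (rows.zip (cols.zip (wides.zip talls)))[k] := by
    intro k hk
    have hk' : k < rows.length := by omega
    simp only [List.getElem_zip, gQuad]
    simp [List.getD_eq_getElem?_getD,
      List.getElem?_eq_getElem hk',
      List.getElem?_eq_getElem (show k < cols.length by omega),
      List.getElem?_eq_getElem (show k < wides.length by omega),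
      List.getElem?_eq_getElem (show k < talls.length by omega)]
  have hA : some_abutted rows cols wides talls
      = pairsAny PA (rows.zip (cols.zip (wides.zip talls))) := by
    have h := A_eq_pairsAny (gQuad rows cols wides talls) PA
      (rows.zip (cols.zip (wides.zip talls))) hg rows.length (by omega)
    rw [List.take_of_length_le (by omega)] at h
    rw [← h]
    rfl
  have hB : some_abutted_alt rows cols wides talls
      = pairsAny Pq (rows.zip (cols.zip (wides.zip talls))) := by
    unfold some_abutted_alt
    rw [altLoop_eq _ [] _ _ _ _ (DInv_empty _ _) (DInv_empty _ _) (DInv_empty _ _)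
      (DInv_empty _ _), scanPairs_nil_eq]
  rw [hA, hB]
  exact pairsAny_congr _ _ PA_eq_Pq _
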